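-- pv_equiv track=rewrite | github.com/wbfw109/study-core | src/python/wbfw109/algorithms/_practice/programmers/lv0.py | solution_120853
-- ===== SOURCE A (Python) =====
-- def solution_120853(s: str) -> int:
--     """컨트롤 제트 ; https://school.programmers.co.kr/learn/courses/30/lessons/120853"""
--     total: int = 0
--     is_z: bool = False
--     for ss in reversed(s.split()):
--         if ss == "Z":
--             is_z = True
--         else:
--             if is_z:
--                 is_z = False
--             else:
--                 total += int(ss)
--
--     return total
-- ===== SOURCE B (Python) =====
-- def solution_120853(s: str) -> int:
--     toks = s.split()
--     n = len(toks)
--     return sum(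
--         int(t)
--         for i, t in enumerate(toks)
--         if t != "Z" and (i + 1 == n or toks[i + 1] != "Z")
--     )
-- ===== Notes on version B (the rewrite author's own statement) =====
-- stated objective: alternative
-- what changed: Replaces the reversed scan with a carried boolean flag by a single stateless forward pass that sums every numeric token whose immediate successor is not 'Z'.
import Mathlib
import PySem

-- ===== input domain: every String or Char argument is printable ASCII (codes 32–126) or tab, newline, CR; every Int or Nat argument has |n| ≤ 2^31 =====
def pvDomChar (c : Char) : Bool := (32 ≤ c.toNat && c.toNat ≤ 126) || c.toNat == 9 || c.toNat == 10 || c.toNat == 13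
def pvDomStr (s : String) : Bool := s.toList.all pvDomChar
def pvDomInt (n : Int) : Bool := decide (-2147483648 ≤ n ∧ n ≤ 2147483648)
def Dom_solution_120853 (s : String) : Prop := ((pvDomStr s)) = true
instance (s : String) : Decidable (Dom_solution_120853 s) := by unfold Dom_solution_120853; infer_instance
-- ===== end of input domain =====

-- B replaces A's reversed scan with a carried boolean flag by a stateless forward pass
-- summing every numeric token whose immediate successor is not "Z" (alternative decomposition).

-- ===== PORT A =====
-- A: fold over reversed token list with state (total, is_z); int(ss) → (ofStr? ss).getD 0,
-- Pre_ guarantees ofStr? is some on every token this branch reaches.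
def pvStepA (st : Int × Bool) (ss : String) : Int × Bool :=
  if ss = "Z" then (st.1, true)
  else if st.2 then (st.1, false)
  else (st.1 + (PySem.Int.ofStr? ss).getD 0, false)

def solution_120853 (s : String) : Int :=
  (((PySem.Str.split₀ s).reverse).foldl pvStepA (0, false)).1

-- ===== PORT B =====
-- B: forward adjacency sum — add int(t) when t ≠ "Z" and the following token is not "Z".
def pvAltSum : List String → Int
  | [] => 0
  | [t] => if t ≠ "Z" then (PySem.Int.ofStr? t).getD 0 else 0
  | t :: u :: rest =>
      (if t ≠ "Z" ∧ u ≠ "Z" then (PySem.Int.ofStr? t).getD 0 else 0) + pvAltSum (u :: rest)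

def solution_120853_alt (s : String) : Int := pvAltSum (PySem.Str.split₀ s)

-- ===== PRECONDITION & SPEC =====
-- Pre_ excludes exactly the inputs where A raises ValueError: a non-"Z" token that is not
-- cancelled by a following "Z" must parse as an int.
def Pre_solution_120853 (s : String) : Prop :=
  ∀ i : Fin (PySem.Str.split₀ s).length,
    ((PySem.Str.split₀ s).get i ≠ "Z" ∧ (PySem.Str.split₀ s)[i.1 + 1]? ≠ some "Z") →
    (PySem.Int.ofStr? ((PySem.Str.split₀ s).get i)).isSome
instance (s : String) : Decidable (Pre_solution_120853 s) := by unfold Pre_solution_120853; infer_instance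
def pvWitness_solution_120853 : String := "1 2 Z Z -3"

def Spec_solution_120853 (s : String) (out : Int) : Prop := out = solution_120853_alt s
instance (s : String) (out : Int) : Decidable (Spec_solution_120853 s out) := by unfold Spec_solution_120853; infer_instance

-- ===== CLAIM (what is proved, stated in full; the proofs are below) =====
def Claim_equal_solution_120853 : Prop := ∀ (s : String), Dom_solution_120853 s → Pre_solution_120853 s → Spec_solution_120853 s (solution_120853 s)

-- ===== LEMMAS AND PROOFS =====
-- A's reverse-foldl is the foldr of its step over the forward list.
def pvF (toks : List String) : Int × Bool := toks.foldr (fun ss st => pvStepA st ss) (0, false)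

theorem pvF_flag : ∀ (t : String) (rest : List String),
    (pvF (t :: rest)).2 = (t = "Z" : Bool) := by
  intro t rest
  simp only [pvF, List.foldr, pvStepA]
  by_cases h : t = "Z" <;> simp [h] <;> split <;> simp

theorem pvAltSum_eq_pvF : ∀ toks : List String, pvAltSum toks = (pvF toks).1 := by
  intro toks
  induction toks with
  | nil => rfl
  | cons t rest ih =>
    cases rest with
    | nil =>
      simp only [pvAltSum, pvF, List.foldr, pvStepA]
      by_cases h : t = "Z" <;> simp [h]
    | cons u rest' =>
      have hflag := pvF_flag u rest'
      simp only [pvAltSum, ih]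
      show _ = (pvStepA (pvF (u :: rest')) t).1
      by_cases ht : t = "Z"
      · simp [pvStepA, ht]
      · by_cases hu : u = "Z"
        · simp [pvStepA, ht, hu] at hflag ⊢
          rw [hflag]; simp
        · simp [pvStepA, ht, hu] at hflag ⊢
          rw [hflag]; simp [Int.add_comm]

-- ===== VERDICT (by name: the statement is the Claim_ definition above) =====
theorem solution_120853_spec : Claim_equal_solution_120853 := by
  intro s _ _
  show solution_120853 s = solution_120853_alt s
  unfold solution_120853 solution_120853_alt
  rw [List.foldl_reverse, ← pvF, pvAltSum_eq_pvF]
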